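-- pv_equiv track=rewrite | github.com/maciejjankowski/api-evergrow | app/utils/anonymization.py | _suggest_focus_areas
-- ===== SOURCE A (Python) =====
-- from typing import Dict, List, Optional, Any
--
-- def _suggest_focus_areas(assessment_data: Dict[str, Any]) -> List[str]:
--     """Suggest focus areas based on assessment"""
--     suggestions = []
--
--     # Based on challenges and priorities
--     challenges = assessment_data.get('challenges', [])
--     priorities = assessment_data.get('skill_priorities', [])
--
--     # Simple rule-based suggestions
--     if any('leadership' in str(item).lower() for item in challenges + priorities):
--         suggestions.append('leadership_development')
--
--     if any('communication' in str(item).lower() for item in challenges + priorities):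
--         suggestions.append('communication_enhancement')
--
--     if any('strategy' in str(item).lower() for item in challenges + priorities):
--         suggestions.append('strategic_thinking')
--
--     if any('time' in str(item).lower() for item in challenges + priorities):
--         suggestions.append('productivity_optimization')
--
--     return suggestions[:3]  # Return top 3 suggestions
-- ===== SOURCE B (Python) =====
-- # B: single pass over the items with a shrinking worklist of not-yet-matched rules
-- # (each item is examined once, rules are retired as they match, with early exit
-- # when the worklist empties), instead of A's four independent any()-scans.
-- RULES = (
--     ('leadership', 'leadership_development'),
--     ('communication', 'communication_enhancement'),
--     ('strategy', 'strategic_thinking'),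
--     ('time', 'productivity_optimization'),
-- )
--
-- def _suggest_focus_areas(assessment_data):
--     pending = [0, 1, 2, 3]          # rule indices not matched yet
--     matched = [False, False, False, False]
--     items = assessment_data.get('challenges', []) + assessment_data.get('skill_priorities', [])
--     for item in items:
--         if not pending:
--             break
--         text = str(item).lower()
--         still = []
--         for i in pending:
--             if RULES[i][0] in text:
--                 matched[i] = True
--             else:
--                 still.append(i)
--         pending = still
--     return [RULES[i][1] for i in range(4) if matched[i]][:3]
-- ===== Notes on version B (the rewrite author's own statement) =====
-- stated objective: alternative
-- what changed: Inverts the loop nesting: one pass over the combined items with a shrinking worklist of not-yet-matched rules and early exit once all rules have matched, instead of A's four independent any()-scans over the whole list; suggestions are then emitted from the matched flags in rule order.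
import Mathlib
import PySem

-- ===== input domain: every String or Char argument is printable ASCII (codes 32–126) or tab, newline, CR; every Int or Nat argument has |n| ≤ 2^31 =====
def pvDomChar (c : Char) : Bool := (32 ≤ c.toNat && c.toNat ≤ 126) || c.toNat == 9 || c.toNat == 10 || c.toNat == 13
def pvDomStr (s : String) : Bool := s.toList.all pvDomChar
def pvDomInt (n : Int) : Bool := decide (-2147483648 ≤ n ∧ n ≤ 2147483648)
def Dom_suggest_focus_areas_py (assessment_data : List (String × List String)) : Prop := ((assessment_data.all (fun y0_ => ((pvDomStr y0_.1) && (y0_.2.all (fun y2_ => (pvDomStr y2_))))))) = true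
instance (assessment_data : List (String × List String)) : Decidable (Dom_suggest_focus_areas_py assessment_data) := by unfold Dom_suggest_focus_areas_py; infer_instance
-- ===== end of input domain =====

-- B makes one pass over the combined items with a shrinking worklist of not-yet-matched rules
-- (early exit when empty), instead of A's four independent any()-scans; objective: alternative.


-- ===== PORT A =====
def suggest_focus_areas_py (assessment_data : List (String × List String)) : List String :=
  let suggestions : List String := []
  let d := PySem.Dict.mk assessment_data
  let challenges := d.getD "challenges" []
  let priorities := d.getD "skill_priorities" []
  let suggestions := if (challenges ++ priorities).any
      (fun item => PySem.Str.isIn "leadership" (PySem.Str.lower item))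
    then suggestions ++ ["leadership_development"] else suggestions
  let suggestions := if (challenges ++ priorities).any
      (fun item => PySem.Str.isIn "communication" (PySem.Str.lower item))
    then suggestions ++ ["communication_enhancement"] else suggestions
  let suggestions := if (challenges ++ priorities).any
      (fun item => PySem.Str.isIn "strategy" (PySem.Str.lower item))
    then suggestions ++ ["strategic_thinking"] else suggestions
  let suggestions := if (challenges ++ priorities).any
      (fun item => PySem.Str.isIn "time" (PySem.Str.lower item))
    then suggestions ++ ["productivity_optimization"] else suggestions
  PySem.List.slice suggestions none (some 3)

-- ===== PORT B =====
def pvRules : List (String × String) :=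
  [("leadership", "leadership_development"),
   ("communication", "communication_enhancement"),
   ("strategy", "strategic_thinking"),
   ("time", "productivity_optimization")]

-- the containment test 'RULES[i][0] in text' of Source B
def pvHit (i : Nat) (text : String) : Bool :=
  PySem.Str.isIn (pvRules.getD i ("", "")).1 text

-- inner loop of Source B: one pass over the pending rule indices against one lowercased item
def pvStep (text : String) (acc : List Nat × List Bool) (i : Nat) : List Nat × List Bool :=
  if pvHit i text then (acc.1, acc.2.set i true) else (acc.1 ++ [i], acc.2)

-- outer loop over the items, carrying (pending, matched), with early exit
def pvLoop : List String → List Nat → List Bool → List Bool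
  | [], _, matched => matched
  | item :: rest, pending, matched =>
    if pending.isEmpty then matched
    else
      let r := pending.foldl (pvStep (PySem.Str.lower item)) ([], matched)
      pvLoop rest r.1 r.2

def suggest_focus_areas_py_alt (assessment_data : List (String × List String)) : List String :=
  let d := PySem.Dict.mk assessment_data
  let items := d.getD "challenges" [] ++ d.getD "skill_priorities" []
  let matched := pvLoop items [0, 1, 2, 3] [false, false, false, false]
  PySem.List.slice
    (((List.range 4).filter (fun i => matched.getD i false)).map
      (fun i => (pvRules.getD i ("", "")).2))
    none (some 3)

-- ===== PRECONDITION & SPEC =====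
def Spec_suggest_focus_areas_py (assessment_data : List (String × List String)) (out : List String) : Prop := out = suggest_focus_areas_py_alt assessment_data
instance (assessment_data : List (String × List String)) (out : List String) : Decidable (Spec_suggest_focus_areas_py assessment_data out) := by unfold Spec_suggest_focus_areas_py; infer_instance

-- ===== CLAIM (what is proved, stated in full; the proofs are below) =====
def Claim_equal_suggest_focus_areas_py : Prop := ∀ (assessment_data : List (String × List String)), Dom_suggest_focus_areas_py assessment_data → Spec_suggest_focus_areas_py assessment_data (suggest_focus_areas_py assessment_data)

-- ===== LEMMAS AND PROOFS =====

-- characterisation of the inner foldl: the surviving worklist and the updated flags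
theorem pv_foldl_step (text : String) (p : List Nat) (acc0 : List Nat) (m : List Bool)
    (hp : ∀ i ∈ p, i < m.length) :
    ((p.foldl (pvStep text) (acc0, m)).1 = acc0 ++ p.filter (fun i => !(pvHit i text)))
    ∧ ((p.foldl (pvStep text) (acc0, m)).2.length = m.length)
    ∧ (∀ j, (p.foldl (pvStep text) (acc0, m)).2.getD j false
        = (m.getD j false || (p.contains j && pvHit j text))) := by
  induction p generalizing acc0 m with
  | nil => simp
  | cons i p ih =>
    have hi : i < m.length := hp i (List.mem_cons_self)
    have hp' : ∀ x ∈ p, x < m.length := fun x hx => hp x (List.mem_cons_of_mem _ hx)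
    rw [List.foldl_cons]
    cases h : pvHit i text with
    | true =>
      have hstep : pvStep text (acc0, m) i = (acc0, m.set i true) := by
        simp [pvStep, h]
      rw [hstep]
      obtain ⟨h1, h2, h3⟩ := ih acc0 (m.set i true) (by simpa using hp')
      refine ⟨?_, by simpa using h2, ?_⟩
      · rw [h1, List.filter_cons_of_neg (by simp [h])]
      · intro j
        rw [h3 j]
        by_cases hji : j = i
        · subst hji
          simp [List.getD, List.getElem?_set_self hi, h]
        · simp only [List.getD, List.getElem?_set_ne (fun e => hji e.symm)]
          simp [List.contains_eq_mem, hji]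
    | false =>
      have hstep : pvStep text (acc0, m) i = (acc0 ++ [i], m) := by
        simp [pvStep, h]
      rw [hstep]
      obtain ⟨h1, h2, h3⟩ := ih (acc0 ++ [i]) m hp'
      refine ⟨?_, h2, ?_⟩
      · rw [h1, List.filter_cons_of_pos (by simp [h]), List.append_assoc]
        rfl
      · intro j
        rw [h3 j]
        by_cases hji : j = i
        · subst hji; simp [h]
        · simp [List.contains_eq_mem, hji]

-- main loop invariant: the final flags record, per rule, whether any item matched it
theorem pv_loop (items : List String) (p : List Nat) (m : List Bool)
    (hlen : m.length = 4)
    (hmem : ∀ i ∈ p, i < 4)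
    (hiff : ∀ i, i < 4 → (p.contains i = !(m.getD i false))) :
    ∀ j, j < 4 → (pvLoop items p m).getD j false
      = (m.getD j false
         || (p.contains j && items.any (fun it => pvHit j (PySem.Str.lower it)))) := by
  induction items generalizing p m with
  | nil => intro j hj; simp [pvLoop]
  | cons item rest ih =>
    intro j hj
    by_cases hpe : p.isEmpty
    · have hp0 : p = [] := List.isEmpty_iff.mp hpe
      subst hp0
      simp [pvLoop]
    · have hp4 : ∀ i ∈ p, i < m.length := by intro i hi; rw [hlen]; exact hmem i hi
      obtain ⟨h1, h2, h3⟩ := pv_foldl_step (PySem.Str.lower item) p [] m hp4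
      have hrec := ih (p.foldl (pvStep (PySem.Str.lower item)) ([], m)).1
        (p.foldl (pvStep (PySem.Str.lower item)) ([], m)).2
        (by rw [h2, hlen])
        (by intro i hi; rw [h1] at hi; simp at hi; exact hmem i hi.1)
        (by
          intro i hi4
          rw [h1, h3 i]
          by_cases hip : i ∈ p
          · have hmf : m[i]?.getD false = false := by
              have := hiff i hi4
              simp [List.contains_eq_mem, hip, List.getD] at this
              exact this
            cases hIn : pvHit i (PySem.Str.lower item) <;>
              simp [List.contains_eq_mem, List.mem_filter, hip, hIn, hmf, List.getD]
          · have hmt : m[i]?.getD false = true := by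
              have := hiff i hi4
              simp [List.contains_eq_mem, hip, List.getD] at this
              exact this
            simp [List.contains_eq_mem, List.mem_filter, hip, hmt, List.getD])
      simp only [pvLoop, hpe, Bool.false_eq_true, if_false]
      rw [hrec j hj, h3 j, h1]
      simp only [List.any_cons]
      by_cases hjp : j ∈ p
      · have hmj : m[j]?.getD false = false := by
          have := hiff j hj
          simp [List.contains_eq_mem, hjp, List.getD] at this
          exact this
        cases hIn : pvHit j (PySem.Str.lower item) <;>
          simp [hmj, hIn, List.contains_eq_mem, List.mem_filter, hjp, List.getD]
      · simp [List.contains_eq_mem, List.mem_filter, hjp, List.getD]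

theorem pv_matched (items : List String) (j : Nat) (hj : j < 4) :
    (pvLoop items [0, 1, 2, 3] [false, false, false, false]).getD j false
      = items.any (fun it => pvHit j (PySem.Str.lower it)) := by
  have h := pv_loop items [0, 1, 2, 3] [false, false, false, false] (by simp)
    (by intro i hi; fin_cases hi <;> omega)
    (by intro i hi; interval_cases i <;> simp [List.contains_eq_mem, List.getD])
    j hj
  rw [h]
  have hc : List.contains [0, 1, 2, 3] j = true := by
    simp [List.contains_eq_mem]; omega
  rw [hc]
  interval_cases j <;> simp [List.getD]

-- the four flags, with the keyword of each rule spelled out (definitionally equal to pvHit)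
theorem pv_m0 (items : List String) :
    (pvLoop items [0, 1, 2, 3] [false, false, false, false]).getD 0 false
      = items.any (fun it => PySem.Str.isIn "leadership" (PySem.Str.lower it)) :=
  pv_matched items 0 (by omega)

theorem pv_m1 (items : List String) :
    (pvLoop items [0, 1, 2, 3] [false, false, false, false]).getD 1 false
      = items.any (fun it => PySem.Str.isIn "communication" (PySem.Str.lower it)) :=
  pv_matched items 1 (by omega)

theorem pv_m2 (items : List String) :
    (pvLoop items [0, 1, 2, 3] [false, false, false, false]).getD 2 false
      = items.any (fun it => PySem.Str.isIn "strategy" (PySem.Str.lower it)) :=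
  pv_matched items 2 (by omega)

theorem pv_m3 (items : List String) :
    (pvLoop items [0, 1, 2, 3] [false, false, false, false]).getD 3 false
      = items.any (fun it => PySem.Str.isIn "time" (PySem.Str.lower it)) :=
  pv_matched items 3 (by omega)

-- ===== VERDICT (by name: the statement is the Claim_ definition above) =====
theorem suggest_focus_areas_py_spec : Claim_equal_suggest_focus_areas_py := by
  intro assessment_data _
  unfold Spec_suggest_focus_areas_py suggest_focus_areas_py suggest_focus_areas_py_alt
  rw [show List.range 4 = [0, 1, 2, 3] from by decide]
  simp only [List.filter_cons, List.filter_nil]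
  rw [pv_m0, pv_m1, pv_m2, pv_m3]
  cases ((PySem.Dict.mk assessment_data).getD "challenges" [] ++ (PySem.Dict.mk assessment_data).getD "skill_priorities" []).any (fun it => PySem.Str.isIn "leadership" (PySem.Str.lower it)) <;>
  cases ((PySem.Dict.mk assessment_data).getD "challenges" [] ++ (PySem.Dict.mk assessment_data).getD "skill_priorities" []).any (fun it => PySem.Str.isIn "communication" (PySem.Str.lower it)) <;>
  cases ((PySem.Dict.mk assessment_data).getD "challenges" [] ++ (PySem.Dict.mk assessment_data).getD "skill_priorities" []).any (fun it => PySem.Str.isIn "strategy" (PySem.Str.lower it)) <;>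
  cases ((PySem.Dict.mk assessment_data).getD "challenges" [] ++ (PySem.Dict.mk assessment_data).getD "skill_priorities" []).any (fun it => PySem.Str.isIn "time" (PySem.Str.lower it)) <;>
  rfl
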